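-- pv_equiv track=rewrite | github.com/AF-Security/python | Loops/plates1.py | num_check
-- ===== SOURCE A (Python) =====
-- def num_check(s):
--     number_started = False
--     for c in s[2:]:
--         if c.isdigit():
--             if not number_started:
--                 if c == "0":  # First number cannot be 0
--                     return False
--                 number_started = True
--         elif number_started and c.isalpha():  # Numbers cannot be followed by letters
--             return False
--     return True
-- ===== SOURCE B (Python) =====
-- def num_check(s):
--     ok = True
--     letter_after = False
--     first_digit = None
--     for c in reversed(s[2:]):
--         if c.isdigit():
--             if letter_after:
--                 ok = False
--             first_digit = c
--         elif c.isalpha():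
--             letter_after = True
--     return ok and first_digit != "0"
-- ===== Notes on version B (the rewrite author's own statement) =====
-- stated objective: alternative
-- what changed: B traverses s[2:] RIGHT-TO-LEFT with an accumulator (has-a-letter-occurred-later flag, leftmost digit seen so far, validity bit) and decides at the end, instead of A's left-to-right scan with early returns and a number_started flag.
import Mathlib
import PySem

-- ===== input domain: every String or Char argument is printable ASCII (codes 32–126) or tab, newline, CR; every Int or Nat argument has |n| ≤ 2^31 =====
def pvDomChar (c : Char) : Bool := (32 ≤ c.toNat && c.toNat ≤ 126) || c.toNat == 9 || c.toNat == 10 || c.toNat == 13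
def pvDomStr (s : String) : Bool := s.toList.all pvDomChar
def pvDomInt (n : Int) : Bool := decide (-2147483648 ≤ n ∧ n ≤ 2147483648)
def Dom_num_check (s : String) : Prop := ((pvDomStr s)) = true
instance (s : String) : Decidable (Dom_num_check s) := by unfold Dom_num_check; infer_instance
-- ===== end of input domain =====

-- B scans s[2:] right-to-left with an accumulator and decides at the end, instead of A's
-- left-to-right scan with early returns (objective: alternative traversal; same cost).

-- ===== PORT A =====
-- the for-loop with early returns, carrying the number_started flag
def numCheckGo : List Char → Bool → Bool
  | [], _ => true
  | c :: rest, started =>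
    if PySem.Chars.isdigit c then
      if !started then
        if c = '0' then false else numCheckGo rest true
      else numCheckGo rest started
    else if started && PySem.Chars.isalpha c then false
    else numCheckGo rest started

def num_check (s : String) : Bool :=
  numCheckGo (PySem.List.slice s.toList (some 2) none) false

-- ===== PORT B =====
-- loop body: state (ok, letter_after, first_digit), updated per reversed character
def revStep (st : Bool × Bool × Option Char) (c : Char) : Bool × Bool × Option Char :=
  if PySem.Chars.isdigit c then
    ((if st.2.1 then false else st.1), st.2.1, some c)
  else if PySem.Chars.isalpha c then (st.1, true, st.2.2)
  else st

def num_check_alt (s : String) : Bool :=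
  let tail := PySem.List.slice s.toList (some 2) none
  let st := tail.reverse.foldl revStep (true, false, none)
  st.1 && !(st.2.2 == some '0')

-- ===== PRECONDITION & SPEC =====
def Spec_num_check (s : String) (out : Bool) : Prop := out = num_check_alt s
instance (s : String) (out : Bool) : Decidable (Spec_num_check s out) := by unfold Spec_num_check; infer_instance

-- ===== CLAIM (what is proved, stated in full; the proofs are below) =====
def Claim_equal_num_check : Prop := ∀ (s : String), Dom_num_check s → Spec_num_check s (num_check s)

-- ===== LEMMAS AND PROOFS =====
-- proof-only characterisation of B's fold: validity bit, alpha-occurrence, first digit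
def okSpec : List Char → Bool
  | [] => true
  | c :: r => if PySem.Chars.isdigit c then (if r.any PySem.Chars.isalpha then false else okSpec r) else okSpec r

def firstDig : List Char → Option Char
  | [] => none
  | c :: r => if PySem.Chars.isdigit c then some c else firstDig r

theorem isalpha_of_isdigit (c : Char) (h : PySem.Chars.isdigit c = true) :
    PySem.Chars.isalpha c = false := by
  unfold PySem.Chars.isdigit at h
  simp only [Bool.and_eq_true, decide_eq_true_eq] at h
  unfold PySem.Chars.isalpha PySem.Chars.isupper PySem.Chars.islower
  have hA : ¬ ('A' : Char) ≤ c := fun hc => absurd (le_trans hc h.2) (by decide)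
  have ha : ¬ ('a' : Char) ≤ c := fun hc => absurd (le_trans hc h.2) (by decide)
  simp [hA, ha]

theorem foldl_rev_char (l : List Char) :
    l.reverse.foldl revStep (true, false, none) =
      (okSpec l, l.any PySem.Chars.isalpha, firstDig l) := by
  induction l with
  | nil => rfl
  | cons c rest ih =>
    simp only [List.reverse_cons, List.foldl_append, List.foldl_cons, List.foldl_nil, ih]
    by_cases hd : PySem.Chars.isdigit c = true
    · simp [revStep, hd, okSpec, firstDig, List.any_cons, isalpha_of_isdigit c hd]
    · by_cases ha : PySem.Chars.isalpha c = true
      · simp [revStep, hd, ha, okSpec, firstDig, List.any_cons]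
      · simp [revStep, hd, ha, okSpec, firstDig, List.any_cons]

theorem okSpec_no_alpha (l : List Char) (h : l.any PySem.Chars.isalpha = false) :
    okSpec l = true := by
  induction l with
  | nil => rfl
  | cons c rest ih =>
    simp only [List.any_cons, Bool.or_eq_false_iff] at h
    simp [okSpec, ih h.2, h.2]

theorem numCheckGo_true (l : List Char) :
    numCheckGo l true = !(l.any PySem.Chars.isalpha) := by
  induction l with
  | nil => rfl
  | cons c rest ih =>
    by_cases hd : PySem.Chars.isdigit c = true
    · simp [numCheckGo, hd, isalpha_of_isdigit c hd, ih]
    · by_cases ha : PySem.Chars.isalpha c = true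
      · simp [numCheckGo, hd, ha]
      · simp [numCheckGo, hd, ha, ih]

theorem numCheckGo_char (l : List Char) :
    numCheckGo l false = (okSpec l && !(firstDig l == some '0')) := by
  induction l with
  | nil => rfl
  | cons c rest ih =>
    by_cases hd : PySem.Chars.isdigit c = true
    · by_cases h0 : c = '0'
      · subst h0
        simp [numCheckGo, okSpec, firstDig, (by decide : PySem.Chars.isdigit '0' = true)]
      · by_cases halr : rest.any PySem.Chars.isalpha = true
        · simp [numCheckGo, okSpec, firstDig, hd, h0, halr, numCheckGo_true]
        · simp only [Bool.not_eq_true] at halr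
          simp [numCheckGo, okSpec, firstDig, hd, h0, halr, numCheckGo_true,
            okSpec_no_alpha rest halr]
    · simp [numCheckGo, okSpec, firstDig, hd, ih]

-- ===== VERDICT (by name: the statement is the Claim_ definition above) =====
theorem num_check_spec : Claim_equal_num_check := by
  intro s _
  unfold Spec_num_check num_check num_check_alt
  simp only [numCheckGo_char, foldl_rev_char]
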